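-- pv_equiv track=rewrite | github.com/WinChitiphat/QuoteRate | server.py | factor_pair
-- ===== SOURCE A (Python) =====
-- def factor_pair(length: int) -> tuple[int, int]:
--     target = length + (length % 2)
--     left = 1
--     right = 1
--     factor = 2
--
--     while target > 1:
--       while target % factor == 0:
--         if left < right:
--           left *= factor
--         else:
--           right *= factor
--         target //= factor
--       factor += 1
--
--     return (left, right) if left <= right else (right, left)
-- ===== SOURCE B (Python) =====
-- def factor_pair(length: int) -> tuple[int, int]:
--     target = length + (length % 2)
--     primes = []
--     d = 2
--     while d * d <= target:
--         if target % d == 0: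
--             primes.append(d)
--             target //= d
--         else:
--             d += 1
--     if target > 1:
--         primes.append(target)
--     left = 1
--     right = 1
--     for p in primes:
--         if left < right:
--             left *= p
--         else:
--             right *= p
--     return (left, right) if left <= right else (right, left)
-- ===== Notes on version B (the rewrite author's own statement) =====
-- stated objective: faster
-- what changed: B factors the target by trial division only up to sqrt(target) (the remaining cofactor is then a single prime), collecting the ordered prime factors into a list and replaying A's left/right balanced assignment over it, instead of A's trial division by every candidate up to the largest prime factor.
import Mathlib
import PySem

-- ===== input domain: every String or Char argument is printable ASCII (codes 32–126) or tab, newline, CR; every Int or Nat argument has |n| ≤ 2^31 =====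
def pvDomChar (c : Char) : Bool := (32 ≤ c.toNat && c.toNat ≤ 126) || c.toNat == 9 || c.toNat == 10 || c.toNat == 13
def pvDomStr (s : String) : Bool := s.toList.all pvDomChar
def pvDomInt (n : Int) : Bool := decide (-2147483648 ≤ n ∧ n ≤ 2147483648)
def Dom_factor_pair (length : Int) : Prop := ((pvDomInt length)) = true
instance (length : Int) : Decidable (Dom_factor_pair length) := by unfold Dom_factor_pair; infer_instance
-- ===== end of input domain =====

-- B replaces A's trial division by every candidate up to the largest prime factor with
-- trial division only up to sqrt(target) plus the leftover prime cofactor, replaying the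
-- same ordered left/right assignment (objective: faster).

-- ===== PORT A =====
-- A's two nested whiles, flattened into one step-for-step recursion that re-checks both
-- loop conditions at each step (stepwise equivalent: the inner loop exits exactly when
-- t % f ≠ 0, and t = 1 also ends the outer loop).  The Nat fuel is a totality guard
-- only: factor_pair passes enough fuel for every input (proved in fpLoopA_eq below),
-- and on exhaustion the loop exits exactly as A's loop does.
def fpLoopA : Nat → Int → Int → Int → Int → Int × Int
  | 0, _t, _f, l, r => if l ≤ r then (l, r) else (r, l)
  | fuel + 1, t, f, l, r =>
    if 1 < t then
      if PySem.Int.mod t f == 0 then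
        if l < r then fpLoopA fuel (PySem.Int.floordiv t f) f (l * f) r
        else fpLoopA fuel (PySem.Int.floordiv t f) f l (r * f)
      else fpLoopA fuel t (f + 1) l r
    else if l ≤ r then (l, r) else (r, l)

def factor_pair (length : Int) : Int × Int :=
  let target := length + PySem.Int.mod length 2
  fpLoopA (target.toNat * 2 + 1) target 2 1 1

-- ===== PORT B =====
-- the body of B's `for p in primes` loop
def pvAssign (lr : Int × Int) (p : Int) : Int × Int :=
  if lr.1 < lr.2 then (lr.1 * p, lr.2) else (lr.1, lr.2 * p)

-- B's factorisation while-loop; returns (primes so far, remaining target).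
-- The Nat fuel is a totality guard only: factor_pair_alt passes enough fuel for every
-- input (proved in fpFacB_eq below), and on exhaustion the loop exits as the while does.
def fpFacB : Nat → Int → Int → List Int → List Int × Int
  | 0, t, _d, acc => (acc, t)
  | fuel + 1, t, d, acc =>
    if d * d ≤ t then
      if PySem.Int.mod t d == 0 then fpFacB fuel (PySem.Int.floordiv t d) d (acc ++ [d])
      else fpFacB fuel t (d + 1) acc
    else (acc, t)

def factor_pair_alt (length : Int) : Int × Int :=
  let target := length + PySem.Int.mod length 2
  let pt := fpFacB (target.toNat * 2 + 1) target 2 []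
  let primes := pt.1 ++ (if 1 < pt.2 then [pt.2] else [])
  let lr := List.foldl pvAssign (1, 1) primes
  if lr.1 ≤ lr.2 then lr else (lr.2, lr.1)

-- ===== PRECONDITION & SPEC =====
def Spec_factor_pair (length : Int) (out : Int × Int) : Prop := out = factor_pair_alt length
instance (length : Int) (out : Int × Int) : Decidable (Spec_factor_pair length out) := by unfold Spec_factor_pair; infer_instance

-- ===== CLAIM (what is proved, stated in full; the proofs are below) =====
def Claim_equal_factor_pair : Prop := ∀ (length : Int), Dom_factor_pair length → Spec_factor_pair length (factor_pair length)

-- ===== LEMMAS AND PROOFS =====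

-- measure lemmas for the two loops (the fuel-sufficiency inductions cite them)
theorem pvDecDiv {t f : Int} (h1 : 1 < t) (h2 : 2 ≤ f) :
    (PySem.Int.floordiv t f).toNat + (PySem.Int.floordiv t f - f).toNat < t.toNat + (t - f).toNat := by
  have hf : (0:Int) < f := by omega
  rw [PySem.Int.floordiv_eq_ediv_of_pos hf]
  have hq0 : 0 ≤ t / f := Int.ediv_nonneg (by omega) (by omega)
  have hid : f * (t / f) + t % f = t := Int.mul_ediv_add_emod t f
  have hr : 0 ≤ t % f := Int.emod_nonneg t (by omega)
  have h1 : t / f < t := by nlinarith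
  omega

theorem pvDecIncA {t f : Int} (h : 1 < t ∧ 2 ≤ f ∧ f ≤ t)
    (hm : ¬(PySem.Int.mod t f == 0) = true) :
    t.toNat + (t - (f + 1)).toNat < t.toNat + (t - f).toNat := by
  have : f ≠ t := by
    intro he; apply hm; simp [he, PySem.Int.mod_eq_zero_iff_dvd]
  omega

-- Reference: the full trial-division factor list that A's loop works through.
def pvFacts (t f : Int) : List Int :=
  if h : 1 < t ∧ 2 ≤ f ∧ f ≤ t then
    if hm : PySem.Int.mod t f == 0 then
      f :: pvFacts (PySem.Int.floordiv t f) f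
    else pvFacts t (f + 1)
  else []
termination_by (t.toNat + (t - f).toNat)
decreasing_by
  · exact pvDecDiv h.1 h.2.1
  · exact pvDecIncA h hm

def pvFin (lr : Int × Int) : Int × Int := if lr.1 ≤ lr.2 then lr else (lr.2, lr.1)

-- on a state (t, f) with no divisor of t below f, A's loop with sufficient fuel
-- = replay of the reference factor list over (l, r), then sort the pair.
lemma fpLoopA_eq : ∀ (fuel : Nat) (t f l r : Int), 2 ≤ f →
    (∀ k : Int, 2 ≤ k → k < f → ¬ k ∣ t) → t.toNat + (t - f).toNat < fuel →
    fpLoopA fuel t f l r = pvFin (List.foldl pvAssign (l, r) (pvFacts t f)) := by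
  intro fuel
  induction fuel with
  | zero => intro t f l r _ _ hfuel; omega
  | succ fuel ih =>
      intro t f l r h2 hinv hfuel
      by_cases h1 : 1 < t
      · have hft : f ≤ t := by
          by_contra hc
          exact hinv t (by omega) (by omega) dvd_rfl
        by_cases hm : (PySem.Int.mod t f == 0) = true
        · have hdvd : f ∣ t := (PySem.Int.mod_eq_zero_iff_dvd t f).mp (by simpa using hm)
          have hmul : PySem.Int.floordiv t f * f = t := by
            rw [PySem.Int.floordiv_eq_ediv_of_pos (by omega)]
            exact Int.ediv_mul_cancel hdvd
          have hinv' : ∀ k : Int, 2 ≤ k → k < f → ¬ k ∣ PySem.Int.floordiv t f := by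
            intro k hk2 hkf hdk
            exact hinv k hk2 hkf (hdk.trans ⟨f, hmul.symm⟩)
          have hdec := pvDecDiv h1 h2
          have hfuel' : (PySem.Int.floordiv t f).toNat + (PySem.Int.floordiv t f - f).toNat < fuel := by
            omega
          rw [pvFacts]
          simp only [dif_pos (show 1 < t ∧ 2 ≤ f ∧ f ≤ t from ⟨h1, h2, hft⟩), dif_pos hm,
            List.foldl_cons]
          show fpLoopA (fuel + 1) t f l r = _
          unfold fpLoopA
          simp only [if_pos h1, if_pos hm]
          by_cases hlr : l < r
          · simp only [if_pos hlr]
            rw [ih _ _ (l * f) r h2 hinv' hfuel']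
            simp [pvAssign, hlr]
          · simp only [if_neg hlr]
            rw [ih _ _ l (r * f) h2 hinv' hfuel']
            simp [pvAssign, hlr]
        · have hnd : ¬ f ∣ t := by
            intro hdvd
            exact hm (by simp [PySem.Int.mod_eq_zero_iff_dvd, hdvd])
          have hinv' : ∀ k : Int, 2 ≤ k → k < f + 1 → ¬ k ∣ t := by
            intro k hk2 hkf
            rcases lt_or_eq_of_le (by omega : k ≤ f) with hkf' | hkf'
            · exact hinv k hk2 hkf'
            · rw [hkf']; exact hnd
          have hdec := pvDecIncA ⟨h1, h2, hft⟩ hm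
          rw [pvFacts]
          simp only [dif_pos (show 1 < t ∧ 2 ≤ f ∧ f ≤ t from ⟨h1, h2, hft⟩), dif_neg hm]
          show fpLoopA (fuel + 1) t f l r = _
          unfold fpLoopA
          simp only [if_pos h1, if_neg hm]
          exact ih _ _ l r (by omega) hinv' (by omega)
      · rw [pvFacts]
        simp only [dif_neg (show ¬ (1 < t ∧ 2 ≤ f ∧ f ≤ t) by intro hc; exact h1 hc.1),
          List.foldl_nil]
        show fpLoopA (fuel + 1) t f l r = _
        unfold fpLoopA
        simp only [if_neg h1]
        simp [pvFin]

lemma pvFacts_self (t : Int) (h1 : 1 < t) : pvFacts t t = [t] := by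
  have hm : PySem.Int.mod t t = 0 := (PySem.Int.mod_eq_zero_iff_dvd t t).mpr dvd_rfl
  have hd : PySem.Int.floordiv t t = 1 := by
    rw [PySem.Int.floordiv_eq_ediv_of_pos (by omega)]
    exact Int.ediv_self (by omega)
  rw [pvFacts]
  simp only [dif_pos (by omega : 1 < t ∧ 2 ≤ t ∧ t ≤ t), hm, hd]
  rw [pvFacts]
  simp

-- if t > 1 has no divisor in [2, d) and t < d*d, then t is prime: full trial division
-- from d yields exactly [t].
lemma pvFacts_tail (n : Nat) : ∀ t d : Int, (t - d).toNat ≤ n → 2 ≤ d → 1 < t → t < d * d →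
    (∀ k : Int, 2 ≤ k → k < d → ¬ k ∣ t) → pvFacts t d = [t] := by
  induction n with
  | zero =>
      intro t d hn h2 h1 hlt hinv
      have hdt : d ≤ t := by
        by_contra hc
        exact hinv t (by omega) (by omega) dvd_rfl
      have : t = d := by omega
      subst this
      exact pvFacts_self t h1
  | succ n ih =>
      intro t d hn h2 h1 hlt hinv
      have hdt : d ≤ t := by
        by_contra hc
        exact hinv t (by omega) (by omega) dvd_rfl
      rcases eq_or_lt_of_le hdt with he | hlt2
      · subst he
        exact pvFacts_self d h1
      · have hnd : ¬ d ∣ t := by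
          rintro ⟨k, hk⟩
          have hk0 : 0 < k := by nlinarith
          have hk1 : k ≠ 1 := by rintro rfl; rw [mul_one] at hk; omega
          have hkd : k < d := by nlinarith
          exact hinv k (by omega) hkd ⟨d, by rw [hk]; ring⟩
        have hm : ¬ (PySem.Int.mod t d == 0) = true := by
          simp [PySem.Int.mod_eq_zero_iff_dvd, hnd]
        rw [pvFacts]
        simp only [dif_pos (by omega : 1 < t ∧ 2 ≤ d ∧ d ≤ t), dif_neg hm]
        apply ih t (d + 1) (by omega) (by omega) h1 (by nlinarith)
        intro k hk2 hkd
        rcases lt_or_eq_of_le (by omega : k ≤ d) with hkd' | hkd'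
        · exact hinv k hk2 hkd'
        · rw [hkd']; exact hnd

-- B's sqrt-bounded factorisation, with sufficient fuel, plus its leftover cofactor
-- = the reference factor list.
lemma fpFacB_eq : ∀ (fuel : Nat) (t d : Int) (acc : List Int), 2 ≤ d →
    (∀ k : Int, 2 ≤ k → k < d → ¬ k ∣ t) → t.toNat + (t - d).toNat < fuel →
    ∀ ps t', fpFacB fuel t d acc = (ps, t') →
    ps ++ (if 1 < t' then [t'] else []) = acc ++ pvFacts t d := by
  intro fuel
  induction fuel with
  | zero => intro t d acc _ _ hfuel; omega
  | succ fuel ih =>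
      intro t d acc h2 hinv hfuel ps t' heq
      by_cases hdd : d * d ≤ t
      · have h1 : 1 < t := by nlinarith
        have hdt : d ≤ t := by nlinarith
        by_cases hm : (PySem.Int.mod t d == 0) = true
        · unfold fpFacB at heq
          simp only [if_pos hdd, if_pos hm] at heq
          have hdvd : d ∣ t := (PySem.Int.mod_eq_zero_iff_dvd t d).mp (by simpa using hm)
          have hmul : PySem.Int.floordiv t d * d = t := by
            rw [PySem.Int.floordiv_eq_ediv_of_pos (by omega)]
            exact Int.ediv_mul_cancel hdvd
          have hinv' : ∀ k : Int, 2 ≤ k → k < d → ¬ k ∣ PySem.Int.floordiv t d := by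
            intro k hk2 hkd hdk
            exact hinv k hk2 hkd (hdk.trans ⟨d, hmul.symm⟩)
          have hdec := pvDecDiv h1 h2
          have hrec := ih _ _ _ h2 hinv' (by omega) ps t' heq
          rw [hrec]
          conv_rhs => rw [pvFacts]
          simp only [dif_pos (show 1 < t ∧ 2 ≤ d ∧ d ≤ t from ⟨h1, h2, hdt⟩), dif_pos hm]
          simp
        · unfold fpFacB at heq
          simp only [if_pos hdd, if_neg hm] at heq
          have hnd : ¬ d ∣ t := by
            intro hdvd
            exact hm (by simp [PySem.Int.mod_eq_zero_iff_dvd, hdvd])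
          have hinv' : ∀ k : Int, 2 ≤ k → k < d + 1 → ¬ k ∣ t := by
            intro k hk2 hkd
            rcases lt_or_eq_of_le (by omega : k ≤ d) with hkd' | hkd'
            · exact hinv k hk2 hkd'
            · rw [hkd']; exact hnd
          have hdec := pvDecIncA ⟨h1, h2, hdt⟩ hm
          have hrec := ih _ _ _ (by omega) hinv' (by omega) ps t' heq
          rw [hrec]
          conv_rhs => rw [pvFacts]
          simp only [dif_pos (show 1 < t ∧ 2 ≤ d ∧ d ≤ t from ⟨h1, h2, hdt⟩), dif_neg hm]
      · unfold fpFacB at heq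
        simp only [if_neg hdd] at heq
        have hps : ps = acc := congrArg Prod.fst heq.symm
        have ht' : t' = t := congrArg Prod.snd heq.symm
        rw [hps, ht']
        by_cases h1 : 1 < t
        · have hlt : t < d * d := by omega
          rw [pvFacts_tail (t - d).toNat t d (le_refl _) h2 h1 hlt hinv]
          simp [h1]
        · rw [pvFacts]
          simp only [dif_neg (show ¬ (1 < t ∧ 2 ≤ d ∧ d ≤ t) by intro hc; exact h1 hc.1)]
          simp [h1]

-- ===== VERDICT (by name: the statement is the Claim_ definition above) =====
theorem factor_pair_spec : Claim_equal_factor_pair := by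
  intro length _
  unfold Spec_factor_pair
  have h := fpFacB_eq ((length + PySem.Int.mod length 2).toNat * 2 + 1)
      (length + PySem.Int.mod length 2) 2 [] (by omega)
      (by intro k hk hk2 _; omega) (by omega)
      (fpFacB ((length + PySem.Int.mod length 2).toNat * 2 + 1) (length + PySem.Int.mod length 2) 2 []).1
      (fpFacB ((length + PySem.Int.mod length 2).toNat * 2 + 1) (length + PySem.Int.mod length 2) 2 []).2 rfl
  simp only [List.nil_append] at h
  have ha := fpLoopA_eq ((length + PySem.Int.mod length 2).toNat * 2 + 1)
      (length + PySem.Int.mod length 2) 2 1 1 (by omega)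
      (by intro k hk hk2 _; omega) (by omega)
  simp only [factor_pair, factor_pair_alt, ha, h, pvFin]
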